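-- pv_equiv track=rewrite | github.com/GouravSardana/Hangman_game | hangman.py | getAvailableWord
-- ===== SOURCE A (Python) =====
-- import string
--
-- def getAvailableWord(letterGuessed):
--     '''
--     return the available letter which are not guessed by the user
--     '''
--     lowerstr=string.ascii_lowercase
--     value = ''
--     total=''
--     for x in lowerstr:
--         if x not in letterGuessed:
--             value = x
--         else:
--             value=''
--         total=total +value
--     return total
-- ===== SOURCE B (Python) =====
-- import string
--
-- def getAvailableWord(letterGuessed):
--     remaining = set(string.ascii_lowercase) - set(letterGuessed)
--     return ''.join(sorted(remaining))
-- ===== Notes on version B (the rewrite author's own statement) =====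
-- stated objective: idiomatic
-- what changed: Replaces the ordered alphabet walk with a per-letter membership scan of the guessed list and repeated string concatenation by a single set difference (alphabet set minus guessed set) followed by an explicit sort and one join.
import Mathlib
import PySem

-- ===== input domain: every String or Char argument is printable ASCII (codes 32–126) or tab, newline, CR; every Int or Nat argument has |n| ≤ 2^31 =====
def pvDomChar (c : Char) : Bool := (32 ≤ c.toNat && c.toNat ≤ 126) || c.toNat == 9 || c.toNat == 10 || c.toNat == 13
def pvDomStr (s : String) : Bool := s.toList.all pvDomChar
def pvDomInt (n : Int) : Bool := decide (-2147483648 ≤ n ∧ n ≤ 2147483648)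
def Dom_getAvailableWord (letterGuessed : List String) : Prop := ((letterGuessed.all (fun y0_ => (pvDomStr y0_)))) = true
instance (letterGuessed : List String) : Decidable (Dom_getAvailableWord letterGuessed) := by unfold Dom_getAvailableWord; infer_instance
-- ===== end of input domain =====

-- B replaces A's ordered alphabet walk (membership test per letter, string concatenation)
-- by a set difference followed by an explicit sort and a single join (idiomatic).


-- ===== PORT A =====
-- Literal port: fold over the alphabet keeping (value, total); the character list stands
-- for the Python strings `value`/`total` (kernel-transparent, Str convention of PySem).
def getAvailableWord (letterGuessed : List String) : String :=
  let lowerstr : List Char := "abcdefghijklmnopqrstuvwxyz".toList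
  let st := lowerstr.foldl
    (fun (st : List Char × List Char) x =>
      let value : List Char := if String.ofList [x] ∉ letterGuessed then [x] else []
      (value, st.2 ++ value))
    ([], [])
  String.ofList st.2

-- ===== PORT B =====
def getAvailableWord_alt (letterGuessed : List String) : String :=
  let remaining : PySem.Set String :=
    PySem.Set.diff
      (PySem.Set.ofList ("abcdefghijklmnopqrstuvwxyz".toList.map (fun c => String.ofList [c])))
      (PySem.Set.ofList letterGuessed)
  PySem.Str.join "" (PySem.List.sorted remaining (fun x => x) false)

-- ===== PRECONDITION & SPEC =====
def Spec_getAvailableWord (letterGuessed : List String) (out : String) : Prop := out = getAvailableWord_alt letterGuessed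
instance (letterGuessed : List String) (out : String) : Decidable (Spec_getAvailableWord letterGuessed out) := by unfold Spec_getAvailableWord; infer_instance

-- ===== CLAIM (what is proved, stated in full; the proofs are below) =====
def Claim_equal_getAvailableWord : Prop := ∀ (letterGuessed : List String), Dom_getAvailableWord letterGuessed → Spec_getAvailableWord letterGuessed (getAvailableWord letterGuessed)

-- ===== LEMMAS AND PROOFS =====

-- A's loop accumulates exactly the filtered alphabet.
theorem pvFoldA (lg : List String) (cs : List Char) (p : List Char × List Char) :
    (cs.foldl
      (fun (st : List Char × List Char) x =>
        let value : List Char := if String.ofList [x] ∉ lg then [x] else []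
        (value, st.2 ++ value))
      p).2
    = p.2 ++ cs.filter (fun x => String.ofList [x] ∉ lg) := by
  induction cs generalizing p with
  | nil => simp
  | cons c cs ih =>
    rw [List.foldl_cons, ih]
    by_cases h : String.ofList [c] ∉ lg <;> simp [h]

-- singleton strings compare like their characters
theorem pvSingleLt (a b : Char) (h : a < b) : String.ofList [a] < String.ofList [b] := by
  rw [String.lt_iff_toList_lt]
  simp [List.cons_lt_cons_iff, h]

theorem getAvailableWord_spec : Claim_equal_getAvailableWord := by
  intro lg _
  unfold Spec_getAvailableWord getAvailableWord getAvailableWord_alt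
  have hof : PySem.Set.ofList ("abcdefghijklmnopqrstuvwxyz".toList.map (fun c => String.ofList [c]))
      = "abcdefghijklmnopqrstuvwxyz".toList.map (fun c => String.ofList [c]) := by decide
  simp only [hof, PySem.Set.diff]
  have hcont : ∀ s : String, (PySem.Set.ofList lg).contains s = decide (s ∈ lg) := by
    intro s
    simp [PySem.Set.mem_ofList]
  have hfilt :
      ("abcdefghijklmnopqrstuvwxyz".toList.map (fun c => String.ofList [c])).filter
        (fun x => !(PySem.Set.ofList lg).contains x)
      = ("abcdefghijklmnopqrstuvwxyz".toList.filter (fun c => String.ofList [c] ∉ lg)).map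
          (fun c => String.ofList [c]) := by
    rw [List.filter_map]
    exact congrArg _ (List.filter_congr (fun c _ => by simp))
  rw [hfilt]
  -- the filtered alphabet is already sorted
  have halpha : ("abcdefghijklmnopqrstuvwxyz".toList).Pairwise (· < ·) := by decide
  have hpair : (("abcdefghijklmnopqrstuvwxyz".toList.filter (fun c => String.ofList [c] ∉ lg)).map
      (fun c => String.ofList [c])).Pairwise (fun a b => a ≤ b) := by
    rw [List.pairwise_map]
    exact (halpha.filter _).imp (fun h => le_of_lt (pvSingleLt _ _ h))
  rw [PySem.List.sorted_eq_self_of_pairwise _ _ hpair]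
  rw [pvFoldA]
  simp only [PySem.Str.join, List.map_map, Function.comp_def, String.toList_ofList,
    List.nil_append]
  rw [show ("".toList) = ([] : List Char) from rfl, PySem.Chars.join_nil_singletons]
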